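-- pv_equiv track=rewrite | github.com/ivanovmi/reqparser-ui | report.py | get_word_length
-- ===== SOURCE A (Python) =====
-- def get_word_length(dictionary):
--     # Default length of table columns -> 'Package name', 'DEPENDENCIES'
--     length = [12, 4]
--     for key in dictionary.keys():
--         if len(key) > length[0]:
--             length[0] = len(key)
--         if len(dictionary[key]) > length[1]:
--             length[1] = len(dictionary[key])
--     return length
-- ===== SOURCE B (Python) =====
-- def get_word_length(dictionary):
--     # Sort-then-take-last instead of a running-max loop: put the seed (12 or 4)
--     # among the lengths, sort ascending, and the last element is the column width.
--     return [sorted([12] + [len(k) for k in dictionary])[-1],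
--             sorted([4] + [len(v) for v in dictionary.values()])[-1]]
-- ===== Notes on version B (the rewrite author's own statement) =====
-- stated objective: alternative
-- what changed: Replaces the fused running-max loop over a mutable two-element list by a sort-then-take-last computation: the seed (12 or 4) is placed among the key/value lengths, the list is sorted ascending, and the last element is the column width.
import Mathlib
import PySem

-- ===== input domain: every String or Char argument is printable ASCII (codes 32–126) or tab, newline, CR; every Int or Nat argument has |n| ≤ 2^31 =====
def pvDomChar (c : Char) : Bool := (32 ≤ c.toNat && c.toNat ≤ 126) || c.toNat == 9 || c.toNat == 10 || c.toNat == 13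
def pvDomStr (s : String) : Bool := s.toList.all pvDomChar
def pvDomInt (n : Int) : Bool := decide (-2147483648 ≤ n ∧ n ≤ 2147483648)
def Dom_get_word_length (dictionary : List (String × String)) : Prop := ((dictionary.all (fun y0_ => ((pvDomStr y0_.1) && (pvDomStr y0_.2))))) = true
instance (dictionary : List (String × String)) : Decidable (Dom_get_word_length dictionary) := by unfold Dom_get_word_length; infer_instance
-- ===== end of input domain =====

-- B replaces A's fused running-max loop by sort-then-take-last: the seed (12 or 4)
-- is placed among the key/value lengths, the list is sorted, and the last element
-- is the column width; objective: alternative (not faster).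

-- ===== PORT A =====
-- the Python dict: insertion order, duplicate keys overwrite in place
def get_word_length (dictionary : List (String × String)) : List Int :=
  let d := PySem.Dict.ofList dictionary
  let length :=
    d.keys.foldl (fun (length : Int × Int) key =>
      let length := if PySem.Str.len key > length.1 then (PySem.Str.len key, length.2) else length
      -- dictionary[key]: key ∈ keys, so the lookup always succeeds; "" is never used
      let v := d.getD key ""
      if PySem.Str.len v > length.2 then (length.1, PySem.Str.len v) else length)
      ((12 : Int), (4 : Int))
  [length.1, length.2]

-- ===== PORT B =====
def get_word_length_alt (dictionary : List (String × String)) : List Int :=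
  let d := PySem.Dict.ofList dictionary
  -- sorted([12] + lengths)[-1]: the list is nonempty, so [-1] never raises; .getD 0 unused
  [(PySem.List.pyGet? (PySem.List.sorted ((12 : Int) :: d.keys.map (fun k => PySem.Str.len k)) (fun y => y) false) (-1)).getD 0,
   (PySem.List.pyGet? (PySem.List.sorted ((4 : Int) :: d.values.map (fun v => PySem.Str.len v)) (fun y => y) false) (-1)).getD 0]

-- ===== PRECONDITION & SPEC =====
def Spec_get_word_length (dictionary : List (String × String)) (out : List Int) : Prop := out = get_word_length_alt dictionary
instance (dictionary : List (String × String)) (out : List Int) : Decidable (Spec_get_word_length dictionary out) := by unfold Spec_get_word_length; infer_instance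

-- ===== CLAIM (what is proved, stated in full; the proofs are below) =====
def Claim_equal_get_word_length : Prop := ∀ (dictionary : List (String × String)), Dom_get_word_length dictionary → Spec_get_word_length dictionary (get_word_length dictionary)

-- ===== LEMMAS AND PROOFS =====

-- A's fused pair-fold splits into two independent running maxima
theorem pair_fold_split (ps : List (String × String)) (a b : Int) :
    ps.foldl (fun (l : Int × Int) p =>
      let l := if PySem.Str.len p.1 > l.1 then (PySem.Str.len p.1, l.2) else l
      if PySem.Str.len p.2 > l.2 then (l.1, PySem.Str.len p.2) else l) (a, b)
    = ((ps.map (fun p => PySem.Str.len p.1)).foldl max a,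
       (ps.map (fun p => PySem.Str.len p.2)).foldl max b) := by
  induction ps generalizing a b with
  | nil => rfl
  | cons p t ih =>
      simp only [List.foldl_cons, List.map_cons]
      rw [← ih]
      congr 1
      simp only [Int.max_def]
      split_ifs <;> simp_all <;> omega

-- in a ≤-pairwise list, every element is ≤ the last one
theorem le_getLast_of_pairwise : ∀ (s : List Int), s.Pairwise (· ≤ ·) →
    ∀ (hne : s ≠ []) (x : Int), x ∈ s → x ≤ s.getLast hne := by
  intro s
  induction s with
  | nil => intro _ hne; exact absurd rfl hne
  | cons y t ih =>
      intro hp hne x hx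
      rcases List.pairwise_cons.mp hp with ⟨hy, ht⟩
      cases t with
      | nil => simp at hx; simp [hx]
      | cons z u =>
          rw [List.getLast_cons (by simp)]
          rcases List.mem_cons.mp hx with h | h
          · subst h
            exact le_trans (hy z (by simp)) (ih ht (by simp) z (by simp))
          · exact ih ht (by simp) x h

-- the running maximum is attained by some element of the seeded list
theorem foldl_max_mem (a : Int) (l : List Int) : l.foldl max a ∈ a :: l := by
  induction l generalizing a with
  | nil => simp
  | cons x t ih =>
      simp only [List.foldl_cons]
      rcases List.mem_cons.mp (ih (max a x)) with h | h
      · rw [h]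
        rcases max_choice a x with h' | h' <;> simp [h']
      · simp [h]

-- sorted([a]+l)[-1] is the running maximum foldl max a l
theorem sorted_last_eq_foldl_max (a : Int) (l : List Int) :
    (PySem.List.sorted (a :: l) (fun y => y) false).getLast? = some (l.foldl max a) := by
  set s := PySem.List.sorted (a :: l) (fun y => y) false with hs
  have hperm : s.Perm (a :: l) := PySem.List.sorted_perm _ _ _
  have hpw : s.Pairwise (· ≤ ·) := PySem.List.sorted_pairwise (a :: l) (fun y => y)
  have hne : s ≠ [] := by
    intro h; have := hperm.length_eq; simp [h] at this
  have hmem_last : s.getLast hne ∈ a :: l := hperm.mem_iff.mp (List.getLast_mem hne)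
  have hf_mem_s : l.foldl max a ∈ s := hperm.mem_iff.mpr (foldl_max_mem a l)
  have h1 : s.getLast hne ≤ l.foldl max a := by
    rcases List.mem_cons.mp hmem_last with h | h
    · rw [h]; exact (PySem.List.le_foldl_max l a).1
    · exact (PySem.List.le_foldl_max l a).2 _ h
  have h2 : l.foldl max a ≤ s.getLast hne :=
    le_getLast_of_pairwise s hpw hne _ hf_mem_s
  rw [List.getLast?_eq_some_getLast hne]
  exact congrArg some (le_antisymm h1 h2)

-- ===== VERDICT (by name: the statement is the Claim_ definition above) =====
theorem get_word_length_spec : Claim_equal_get_word_length := by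
  unfold Claim_equal_get_word_length
  intro dictionary _
  unfold Spec_get_word_length get_word_length get_word_length_alt
  simp only []
  set d := PySem.Dict.ofList dictionary with hd
  have hnd : d.keys.Nodup := PySem.Dict.nodup_keys_ofList dictionary
  have hitems : d.items = d.keys.map (fun k => (k, d.getD k "")) :=
    PySem.Dict.items_eq_map_keys d hnd ""
  have hkeys : d.keys = d.items.map (fun p => p.1) := rfl
  have hvals : d.values = d.items.map (fun p => p.2) := rfl
  have hfold :
      d.keys.foldl (fun (l : Int × Int) key =>
        let l := if PySem.Str.len key > l.1 then (PySem.Str.len key, l.2) else l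
        if PySem.Str.len (d.getD key "") > l.2 then (l.1, PySem.Str.len (d.getD key "")) else l)
        ((12 : Int), (4 : Int))
      = d.items.foldl (fun (l : Int × Int) p =>
        let l := if PySem.Str.len p.1 > l.1 then (PySem.Str.len p.1, l.2) else l
        if PySem.Str.len p.2 > l.2 then (l.1, PySem.Str.len p.2) else l)
        ((12 : Int), (4 : Int)) := by
    rw [hitems, List.foldl_map]
  rw [PySem.List.pyGet?_neg_one, PySem.List.pyGet?_neg_one,
      sorted_last_eq_foldl_max, sorted_last_eq_foldl_max]
  simp only [Option.getD_some]
  rw [hfold, pair_fold_split, hkeys, hvals, List.map_map, List.map_map]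
  rfl
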